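-- pv_equiv track=rewrite | github.com/tobin-wainer/TESS_Cluster_Age_ML | GaussianNN_CGW/Model_Pipeline/Kfold_PlottingFcns.py | get_param_label
-- ===== SOURCE A (Python) =====
-- def get_param_label(all_param_dicts, current_params):
--     """
--     Create a label string showing ONLY the parameters that vary across runs.
--     `all_param_dicts` is a list of dicts (one for each run).
--     `current_params` is the dict for the run being plotted.
--     """
--
--     # Determine which parameters vary across models
--     varying_params = []
--     all_keys = current_params.keys()
--
--     for key in all_keys:
--         # Collect values of this key from all runs
--         values = {p[key] for p in all_param_dicts if key in p}
--         if len(values) > 1:          # varies across models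
--             varying_params.append(key)
--
--     # Construct label string using only varying params
--     pieces = []
--     for key in varying_params:
--         pieces.append(f"{key}={current_params[key]}")
--     return ", ".join(pieces)
-- ===== SOURCE B (Python) =====
-- def get_param_label(all_param_dicts, current_params):
--     # One pass over all runs builds a key -> set-of-observed-values table,
--     # then one pass over current_params emits "k=v" for keys with >1 value.
--     seen = {}
--     for p in all_param_dicts:
--         for k, v in p.items():
--             seen.setdefault(k, set()).add(v)
--     pieces = [f"{k}={v}" for k, v in current_params.items()
--               if len(seen.get(k, ())) > 1]
--     return ", ".join(pieces)
-- ===== Notes on version B (the rewrite author's own statement) =====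
-- stated objective: alternative
-- what changed: Replaces the per-key rescan of all_param_dicts (one set comprehension over all runs for every key of current_params) by a single pass over all runs that builds a key-to-set-of-values table once, followed by one pass over current_params emitting the varying keys.
import Mathlib
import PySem

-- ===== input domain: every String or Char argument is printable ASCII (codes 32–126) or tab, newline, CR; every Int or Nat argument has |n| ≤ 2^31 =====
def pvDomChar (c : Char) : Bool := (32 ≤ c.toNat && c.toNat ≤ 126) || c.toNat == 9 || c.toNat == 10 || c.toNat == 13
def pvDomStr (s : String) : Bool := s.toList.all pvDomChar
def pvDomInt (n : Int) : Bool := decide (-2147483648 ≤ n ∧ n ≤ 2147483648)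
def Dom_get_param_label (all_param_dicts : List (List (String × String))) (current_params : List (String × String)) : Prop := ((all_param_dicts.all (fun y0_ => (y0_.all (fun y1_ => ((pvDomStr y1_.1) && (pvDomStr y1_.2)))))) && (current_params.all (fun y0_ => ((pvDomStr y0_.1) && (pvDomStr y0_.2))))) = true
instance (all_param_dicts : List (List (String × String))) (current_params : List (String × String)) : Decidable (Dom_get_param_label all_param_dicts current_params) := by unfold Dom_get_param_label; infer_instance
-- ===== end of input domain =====

-- B builds a key -> set-of-observed-values table in one pass over all runs instead of
-- rescanning all_param_dicts once per key of current_params (objective: alternative decomposition).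


-- ===== PORT A =====
-- the set comprehension {p[key] for p in all_param_dicts if key in p}, built left to right
def pvValuesA (all_param_dicts : List (List (String × String))) (key : String) : PySem.Set String :=
  all_param_dicts.foldl
    (fun s p =>
      if (PySem.Dict.mk p).contains key then
        PySem.Set.add s (((PySem.Dict.mk p).get? key).getD "")
      else s)
    PySem.Set.empty

def get_param_label (all_param_dicts : List (List (String × String))) (current_params : List (String × String)) : String :=
  let all_keys := (PySem.Dict.mk current_params).keys
  let varying_params := all_keys.foldl
    (fun acc key =>
      if PySem.Set.len (pvValuesA all_param_dicts key) > 1 then acc ++ [key] else acc)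
    []
  let pieces := varying_params.foldl
    (fun acc key => acc ++ [key ++ "=" ++ (((PySem.Dict.mk current_params).get? key).getD "")])
    []
  PySem.Str.join ", " pieces

-- ===== PORT B =====
-- seen.setdefault(k, set()).add(v), over every item of every run
def pvSeenB (all_param_dicts : List (List (String × String))) : PySem.Dict String (PySem.Set String) :=
  all_param_dicts.foldl
    (fun d p =>
      (PySem.Dict.mk p).items.foldl
        (fun d kv => PySem.Dict.insert d kv.1
          (PySem.Set.add (PySem.Dict.getD d kv.1 PySem.Set.empty) kv.2))
        d)
    PySem.Dict.empty

def get_param_label_alt (all_param_dicts : List (List (String × String))) (current_params : List (String × String)) : String :=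
  let seen := pvSeenB all_param_dicts
  let pieces := (PySem.Dict.mk current_params).items.filterMap
    (fun kv =>
      if PySem.Set.len (PySem.Dict.getD seen kv.1 PySem.Set.empty) > 1 then
        some (kv.1 ++ "=" ++ kv.2)
      else none)
  PySem.Str.join ", " pieces

-- ===== PRECONDITION & SPEC =====
-- Pre_ excludes association lists carrying a duplicate key inside a single dict: those do not
-- represent any Python dict (Python dicts have unique keys), so A never receives them.
def Pre_get_param_label (all_param_dicts : List (List (String × String))) (current_params : List (String × String)) : Prop :=
  (∀ p ∈ all_param_dicts, (p.map Prod.fst).Nodup) ∧ (current_params.map Prod.fst).Nodup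
instance (all_param_dicts : List (List (String × String))) (current_params : List (String × String)) : Decidable (Pre_get_param_label all_param_dicts current_params) := by unfold Pre_get_param_label; infer_instance

def pvWitness_get_param_label : (List (List (String × String))) × (List (String × String)) :=
  ([[("a", "1"), ("b", "x")], [("a", "2"), ("b", "x")]], [("a", "2"), ("b", "x")])

def Spec_get_param_label (all_param_dicts : List (List (String × String))) (current_params : List (String × String)) (out : String) : Prop := out = get_param_label_alt all_param_dicts current_params
instance (all_param_dicts : List (List (String × String))) (current_params : List (String × String)) (out : String) : Decidable (Spec_get_param_label all_param_dicts current_params out) := by unfold Spec_get_param_label; infer_instance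

-- ===== CLAIM (what is proved, stated in full; the proofs are below) =====
def Claim_equal_get_param_label : Prop := ∀ (all_param_dicts : List (List (String × String))) (current_params : List (String × String)), Dom_get_param_label all_param_dicts current_params → Pre_get_param_label all_param_dicts current_params → Spec_get_param_label all_param_dicts current_params (get_param_label all_param_dicts current_params)

-- ===== LEMMAS AND PROOFS =====

-- keys untouched by the inner item-fold keep their entry
theorem pv_inner_untouched (p : List (String × String)) (k : String)
    (d : PySem.Dict String (PySem.Set String)) (hk : k ∉ p.map Prod.fst) :
    PySem.Dict.getD
      (p.foldl (fun d kv => PySem.Dict.insert d kv.1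
        (PySem.Set.add (PySem.Dict.getD d kv.1 PySem.Set.empty) kv.2)) d) k PySem.Set.empty
    = PySem.Dict.getD d k PySem.Set.empty := by
  induction p generalizing d with
  | nil => rfl
  | cons kv rest ih =>
    simp only [List.map_cons, List.mem_cons, not_or] at hk
    simp only [List.foldl_cons]
    rw [ih _ hk.2, PySem.Dict.getD_insert]
    simp [hk.1]

-- one run's item-fold performs exactly A's single conditional Set.add at every key
theorem pv_inner_step (p : List (String × String)) (k : String)
    (d : PySem.Dict String (PySem.Set String)) (hnd : (p.map Prod.fst).Nodup) :
    PySem.Dict.getD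
      (p.foldl (fun d kv => PySem.Dict.insert d kv.1
        (PySem.Set.add (PySem.Dict.getD d kv.1 PySem.Set.empty) kv.2)) d) k PySem.Set.empty
    = (if (PySem.Dict.mk p).contains k then
        PySem.Set.add (PySem.Dict.getD d k PySem.Set.empty) (((PySem.Dict.mk p).get? k).getD "")
      else PySem.Dict.getD d k PySem.Set.empty) := by
  induction p generalizing d with
  | nil => rfl
  | cons kv rest ih =>
    simp only [List.map_cons, List.nodup_cons] at hnd
    simp only [List.foldl_cons]
    by_cases hk : k = kv.1
    · subst hk
      rw [pv_inner_untouched _ _ _ hnd.1]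
      simp [PySem.Dict.contains, PySem.Dict.get?]
    · rw [ih _ hnd.2]
      have h1 : ((kv :: rest).find? (fun q => q.1 == k)) = rest.find? (fun q => q.1 == k) := by
        simp [Ne.symm hk]
      have h2 : (kv.1 == k) = false := by simp [Ne.symm hk]
      simp only [PySem.Dict.contains, PySem.Dict.get?]
      simp only [List.any_cons, h1, PySem.Dict.getD_insert, if_neg hk]
      rw [h2]
      rw [Bool.false_or]

-- B's table, looked up at any key, is exactly A's per-key value set
theorem pv_seen_eq_values (all_param_dicts : List (List (String × String))) (k : String)
    (hnd : ∀ p ∈ all_param_dicts, (p.map Prod.fst).Nodup) :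
    PySem.Dict.getD (pvSeenB all_param_dicts) k PySem.Set.empty = pvValuesA all_param_dicts k := by
  unfold pvSeenB pvValuesA
  suffices h : ∀ (d : PySem.Dict String (PySem.Set String)) (s : PySem.Set String),
      PySem.Dict.getD d k PySem.Set.empty = s →
      PySem.Dict.getD
        (all_param_dicts.foldl (fun d p =>
          (PySem.Dict.mk p).items.foldl
            (fun d kv => PySem.Dict.insert d kv.1
              (PySem.Set.add (PySem.Dict.getD d kv.1 PySem.Set.empty) kv.2)) d) d) k PySem.Set.empty
      = all_param_dicts.foldl
          (fun s p => if (PySem.Dict.mk p).contains k then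
              PySem.Set.add s (((PySem.Dict.mk p).get? k).getD "") else s) s by
    exact h _ _ rfl
  induction all_param_dicts with
  | nil => intro d s hds; simpa using hds
  | cons p rest ih =>
    intro d s hds
    simp only [List.foldl_cons]
    have hp := hnd p (by simp)
    have hrest : ∀ q ∈ rest, (q.map Prod.fst).Nodup := fun q hq => hnd q (by simp [hq])
    have := pv_inner_step p k d hp
    exact (fun hnd => ih hnd _ _ (by rw [this, hds])) hrest
  
-- A's two loops over current_params' keys, fused against B's filterMap over its items
theorem pv_pieces_eq (cond : String → Bool) (cp : List (String × String))
    (l : List (String × String))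
    (hl : ∀ kv ∈ l, ((PySem.Dict.mk cp).get? kv.1).getD "" = kv.2) :
    ((l.map Prod.fst).foldl (fun acc key => if cond key then acc ++ [key] else acc) []).foldl
      (fun acc key => acc ++ [key ++ "=" ++ (((PySem.Dict.mk cp).get? key).getD "")]) []
    = l.filterMap (fun kv => if cond kv.1 then some (kv.1 ++ "=" ++ kv.2) else none) := by
  have key : ∀ (l : List (String × String)) (acc : List String),
      (∀ kv ∈ l, ((PySem.Dict.mk cp).get? kv.1).getD "" = kv.2) →
      ((l.map Prod.fst).foldl (fun acc key => if cond key then acc ++ [key] else acc) acc).foldl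
        (fun acc key => acc ++ [key ++ "=" ++ (((PySem.Dict.mk cp).get? key).getD "")]) []
      = acc.foldl (fun acc key => acc ++ [key ++ "=" ++ (((PySem.Dict.mk cp).get? key).getD "")]) []
        ++ l.filterMap (fun kv => if cond kv.1 then some (kv.1 ++ "=" ++ kv.2) else none) := by
    intro l
    induction l with
    | nil => intro acc _; simp
    | cons kv rest ih =>
      intro acc hmem
      simp only [List.map_cons, List.foldl_cons, List.filterMap_cons]
      by_cases hc : cond kv.1
      · rw [ih _ (fun q hq => hmem q (by simp [hq]))]
        simp [hc, List.foldl_append, hmem kv (by simp)]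
      · rw [ih _ (fun q hq => hmem q (by simp [hq]))]
        simp [hc]
  simpa using key l [] hl

-- with unique keys, every item of cp looks itself up
theorem pv_lookup_self (cp : List (String × String)) (hnd : (cp.map Prod.fst).Nodup) :
    ∀ kv ∈ cp, ((PySem.Dict.mk cp).get? kv.1).getD "" = kv.2 := by
  intro kv hkv
  induction cp with
  | nil => cases hkv
  | cons q rest ih =>
    simp only [List.map_cons, List.nodup_cons] at hnd
    rcases List.mem_cons.mp hkv with h | h
    · subst h; simp [PySem.Dict.get?]
    · have hne : q.1 ≠ kv.1 := fun he => hnd.1 (he ▸ (List.mem_map.mpr ⟨kv, h, rfl⟩))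
      have := ih hnd.2 h
      simpa [PySem.Dict.get?, List.find?_cons, hne] using this

-- ===== VERDICT (by name: the statement is the Claim_ definition above) =====
theorem get_param_label_spec : Claim_equal_get_param_label := by
  intro apd cp _ hpre
  unfold Spec_get_param_label get_param_label get_param_label_alt
  obtain ⟨hall, hcp⟩ := hpre
  have hkeys : (PySem.Dict.mk cp).keys = cp.map Prod.fst := rfl
  simp only [hkeys]
  congr 1
  have hcond : ∀ k, PySem.Set.len (PySem.Dict.getD (pvSeenB apd) k PySem.Set.empty)
      = PySem.Set.len (pvValuesA apd k) := fun k => by rw [pv_seen_eq_values apd k hall]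
  have := pv_pieces_eq (fun k => decide (PySem.Set.len (pvValuesA apd k) > 1)) cp cp
    (pv_lookup_self cp hcp)
  simp only [decide_eq_true_eq] at this
  rw [this]
  congr 1
  funext kv
  rw [hcond kv.1]
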